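-- pv_equiv track=rewrite | github.com/anssar/bots | telegram_bots/bots_settings/taxifishka/taxifishka_utils.py | format_order_addresses
-- ===== SOURCE A (Python) =====
-- def get_letter(n):
--     s = 'ABCDEFGHIJKLMNOPQRSTUVWXYZ'
--     return s[(n - 1) % len(s)]
--
-- def format_order_addresses(source, destination, stops):
--     n = 1
--     ret = ''
--     if not source:
--         return ret
--     ret += '({}) {}\n'.format(get_letter(n), source.split(' *')[0])
--     n += 1
--     for stop in stops:
--         ret += '({}) {}\n'.format(get_letter(n),
--                                  stop.get('address', 'Остановка').split(' *')[0])
--         n += 1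
--     if not destination:
--         return ret
--     ret += '({}) {}\n'.format(get_letter(n), destination.split(' *')[0])
--     return ret
-- ===== SOURCE B (Python) =====
-- def get_letter(n):
--     s = 'ABCDEFGHIJKLMNOPQRSTUVWXYZ'
--     return s[(n - 1) % len(s)]
--
--
-- def format_order_addresses(source, destination, stops):
--     # Recursive decomposition: no mutable counter/accumulator; each call
--     # formats one line and recurses on the remaining stops; the destination
--     # line (if any) is produced in the base case.
--     def fmt(n, addr):
--         return '({}) {}\n'.format(get_letter(n), addr.split(' *')[0])
--
--     def rest(n, remaining):
--         if not remaining: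
--             return fmt(n, destination) if destination else ''
--         return fmt(n, remaining[0].get('address', 'Остановка')) + rest(n + 1, remaining[1:])
--
--     if not source:
--         return ''
--     return fmt(1, source) + rest(2, stops)
-- ===== Notes on version B (the rewrite author's own statement) =====
-- stated objective: alternative
-- what changed: Replaces A's imperative single pass with a mutable counter and growing string accumulator by a recursive descent over the stops list that builds the result right-associatively and emits the optional destination line in its base case.
import Mathlib
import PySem

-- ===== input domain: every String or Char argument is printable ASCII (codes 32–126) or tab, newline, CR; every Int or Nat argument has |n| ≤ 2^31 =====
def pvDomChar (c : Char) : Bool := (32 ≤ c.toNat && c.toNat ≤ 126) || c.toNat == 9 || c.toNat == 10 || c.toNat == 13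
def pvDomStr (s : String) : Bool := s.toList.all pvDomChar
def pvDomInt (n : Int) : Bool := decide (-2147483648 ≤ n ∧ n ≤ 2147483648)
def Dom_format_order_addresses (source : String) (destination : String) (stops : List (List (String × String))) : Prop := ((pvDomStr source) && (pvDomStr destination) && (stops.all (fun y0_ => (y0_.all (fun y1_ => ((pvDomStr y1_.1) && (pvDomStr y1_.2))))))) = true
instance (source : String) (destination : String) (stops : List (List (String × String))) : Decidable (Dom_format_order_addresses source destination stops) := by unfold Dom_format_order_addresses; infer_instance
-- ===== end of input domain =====

-- B replaces A's imperative counter-and-accumulator loop by a recursive descent over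
-- the stops that builds the string right-associatively, emitting the destination line
-- in the base case (return value proved equal).

-- shared helper: both Pythons define/call get_letter
def pyGetLetter (n : Int) : String :=
  let s := "ABCDEFGHIJKLMNOPQRSTUVWXYZ"
  match PySem.Str.pyGet? s (PySem.Int.mod (n - 1) (PySem.Str.len s)) with
  | some c => String.singleton c
  | none => ""   -- unreachable: the index is a residue mod 26, always in range

-- s.split(' *')[0]; the separator is nonempty so split? is `some` and the list nonempty
def pyFirstPart (s : String) : String :=
  match PySem.Str.split? s " *" with
  | some (x :: _) => x
  | _ => ""   -- unreachable

-- ===== PORT A =====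
-- '({}) {}\n'.format(get_letter(n), a) where a is already split
def pyFmtLine (n : Int) (a : String) : String :=
  "(" ++ pyGetLetter n ++ ") " ++ a ++ "\n"

def format_order_addresses (source : String) (destination : String) (stops : List (List (String × String))) : String :=
  if source = "" then ""
  else
    -- ret after the source line, n = 2; then the for-loop threads (n, ret)
    let st := stops.foldl
      (fun (st : Int × String) stop =>
        (st.1 + 1, st.2 ++ pyFmtLine st.1 (pyFirstPart (PySem.Dict.getD ⟨stop⟩ "address" "Остановка"))))
      (2, pyFmtLine 1 (pyFirstPart source))
    if destination = "" then st.2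
    else st.2 ++ pyFmtLine st.1 (pyFirstPart destination)

-- ===== PORT B =====
-- B's fmt(n, addr): the split happens inside the formatting helper
def altFmt (n : Int) (addr : String) : String :=
  "(" ++ pyGetLetter n ++ ") " ++ pyFirstPart addr ++ "\n"

-- B's rest(n, remaining): recursion on the stops, destination line in the base case
def altRest (destination : String) (n : Int) : List (List (String × String)) → String
  | [] => if destination = "" then "" else altFmt n destination
  | stop :: remaining =>
      altFmt n (PySem.Dict.getD ⟨stop⟩ "address" "Остановка") ++ altRest destination (n + 1) remaining

def format_order_addresses_alt (source : String) (destination : String) (stops : List (List (String × String))) : String :=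
  if source = "" then ""
  else altFmt 1 source ++ altRest destination 2 stops

-- ===== PRECONDITION & SPEC =====
def Spec_format_order_addresses (source : String) (destination : String) (stops : List (List (String × String))) (out : String) : Prop := out = format_order_addresses_alt source destination stops
instance (source : String) (destination : String) (stops : List (List (String × String))) (out : String) : Decidable (Spec_format_order_addresses source destination stops out) := by unfold Spec_format_order_addresses; infer_instance

-- ===== CLAIM (what is proved, stated in full; the proofs are below) =====
def Claim_equal_format_order_addresses : Prop := ∀ (source : String) (destination : String) (stops : List (List (String × String))), Dom_format_order_addresses source destination stops → Spec_format_order_addresses source destination stops (format_order_addresses source destination stops)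

-- ===== LEMMAS AND PROOFS =====

-- A's loop, started at (n, r), appends exactly B's recursive block for an empty
-- destination and ends with counter n + stops.length
theorem foldA (stops : List (List (String × String))) : ∀ (n : Int) (r : String),
    stops.foldl
      (fun (st : Int × String) stop =>
        (st.1 + 1, st.2 ++ pyFmtLine st.1 (pyFirstPart (PySem.Dict.getD ⟨stop⟩ "address" "Остановка"))))
      (n, r)
    = (n + stops.length, r ++ altRest "" n stops) := by
  induction stops with
  | nil => intro n r; simp [altRest]
  | cons a l ih =>
      intro n r
      simp only [List.foldl_cons, ih, List.length_cons, altRest, ← String.append_assoc,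
        Prod.mk.injEq]
      constructor
      · push_cast; ring
      · rfl

-- B's block with a nonempty destination is the empty-destination block plus the final line
theorem altRest_dest (destination : String) (hd : destination ≠ "")
    (stops : List (List (String × String))) : ∀ n : Int,
    altRest destination n stops = altRest "" n stops ++ altFmt (n + stops.length) destination := by
  induction stops with
  | nil =>
      intro n
      simp [altRest, hd]
  | cons a l ih =>
      intro n
      simp only [altRest, ih, List.length_cons, String.append_assoc]
      push_cast
      rw [show n + (1 : Int) + l.length = n + (l.length + 1) by ring]

-- ===== VERDICT (by name: the statement is the Claim_ definition above) =====
theorem format_order_addresses_spec : Claim_equal_format_order_addresses := by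
  intro source destination stops _
  unfold Spec_format_order_addresses format_order_addresses format_order_addresses_alt
  by_cases hs : source = ""
  · simp [hs]
  · simp only [hs, ite_false]
    by_cases hd : destination = ""
    · simp only [hd, ite_true]
      rw [foldA]
      rfl
    · simp only [hd, ite_false]
      rw [foldA, altRest_dest destination hd, ← String.append_assoc]
      rfl
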